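-- pv_equiv track=rewrite | github.com/EmiliaNahapetyan/homework | constant_time.py | combine_matrices
-- ===== SOURCE A (Python) =====
-- def combine_matrices(C11, C12, C21, C22):
--     n = len(C11) * 2
--     C = [[0] * n for _ in range(n)]
--     mid = n // 2
--     for i in range(mid):
--         for j in range(mid):
--             C[i][j] = C11[i][j]
--             C[i][j + mid] = C12[i][j]
--             C[i + mid][j] = C21[i][j]
--             C[i + mid][j + mid] = C22[i][j]
--     return C
-- ===== SOURCE B (Python) =====
-- def combine_matrices(C11, C12, C21, C22):
--     mid = len(C11)
--     top = [C11[i][:mid] + C12[i][:mid] for i in range(mid)]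
--     bottom = [C21[i][:mid] + C22[i][:mid] for i in range(mid)]
--     return top + bottom
-- ===== Notes on version B (the rewrite author's own statement) =====
-- stated objective: simpler
-- what changed: Replaces the preallocated zero matrix with nested cell-by-cell index assignment by a single pass over rows that builds each output row as a concatenation of two sliced submatrix rows.
import Mathlib
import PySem

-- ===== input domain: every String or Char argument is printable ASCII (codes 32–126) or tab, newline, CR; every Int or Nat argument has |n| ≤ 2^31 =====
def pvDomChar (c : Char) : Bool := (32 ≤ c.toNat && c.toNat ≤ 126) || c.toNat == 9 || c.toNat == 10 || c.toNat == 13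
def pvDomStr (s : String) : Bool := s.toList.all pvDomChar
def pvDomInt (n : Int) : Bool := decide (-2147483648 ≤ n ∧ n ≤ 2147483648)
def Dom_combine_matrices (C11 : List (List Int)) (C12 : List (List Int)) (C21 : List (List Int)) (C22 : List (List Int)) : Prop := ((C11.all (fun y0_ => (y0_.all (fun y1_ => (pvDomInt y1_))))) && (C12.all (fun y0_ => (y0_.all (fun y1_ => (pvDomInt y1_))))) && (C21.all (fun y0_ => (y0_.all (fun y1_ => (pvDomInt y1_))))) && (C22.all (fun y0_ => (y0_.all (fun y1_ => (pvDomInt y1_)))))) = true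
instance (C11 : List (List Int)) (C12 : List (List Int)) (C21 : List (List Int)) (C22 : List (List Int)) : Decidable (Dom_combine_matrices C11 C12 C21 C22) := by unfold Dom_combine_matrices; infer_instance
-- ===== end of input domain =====

-- B assembles the block matrix row by row (sliced-row concatenation) instead of A's
-- cell-by-cell assignment into a preallocated zero matrix; objective: simpler.

-- ===== PORT A =====
-- C[i][j] = v ; inside Pre_ every written index is in range (out-of-range indexing in
-- Python A raises IndexError; those inputs are excluded by Pre_, so the getD/set
-- defaults below are never relied on).
def pvSetCell (C : List (List Int)) (i j : Nat) (v : Int) : List (List Int) :=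
  C.set i ((C.getD i []).set j v)

def combine_matrices (C11 : List (List Int)) (C12 : List (List Int)) (C21 : List (List Int)) (C22 : List (List Int)) : List (List Int) :=
  let n := C11.length * 2
  let C0 := List.replicate n (List.replicate n (0 : Int))
  let mid := n / 2
  (List.range mid).foldl (fun C i =>
    (List.range mid).foldl (fun C j =>
      let C := pvSetCell C i j ((C11.getD i []).getD j 0)
      let C := pvSetCell C i (j + mid) ((C12.getD i []).getD j 0)
      let C := pvSetCell C (i + mid) j ((C21.getD i []).getD j 0)
      pvSetCell C (i + mid) (j + mid) ((C22.getD i []).getD j 0)) C) C0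

-- ===== PORT B =====
-- xs[:mid] with mid ≥ 0 is List.take mid; the row indexings C11[i], C12[i], C21[i],
-- C22[i] are in range inside Pre_ (outside it Python B raises like A does).
def combine_matrices_alt (C11 : List (List Int)) (C12 : List (List Int)) (C21 : List (List Int)) (C22 : List (List Int)) : List (List Int) :=
  let mid := C11.length
  let top := (List.range mid).map (fun i => (C11.getD i []).take mid ++ (C12.getD i []).take mid)
  let bottom := (List.range mid).map (fun i => (C21.getD i []).take mid ++ (C22.getD i []).take mid)
  top ++ bottom

-- ===== PRECONDITION & SPEC =====
-- Pre_: exactly the inputs on which Python A returns — A reads rows 0..mid-1 and columns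
-- 0..mid-1 of all four submatrices (mid = len(C11)); anything shorter raises IndexError.
def Pre_combine_matrices (C11 : List (List Int)) (C12 : List (List Int)) (C21 : List (List Int)) (C22 : List (List Int)) : Prop :=
  C11.length ≤ C12.length ∧ C11.length ≤ C21.length ∧ C11.length ≤ C22.length ∧
  ∀ i < C11.length,
    C11.length ≤ (C11.getD i []).length ∧ C11.length ≤ (C12.getD i []).length ∧
    C11.length ≤ (C21.getD i []).length ∧ C11.length ≤ (C22.getD i []).length

instance (C11 : List (List Int)) (C12 : List (List Int)) (C21 : List (List Int)) (C22 : List (List Int)) : Decidable (Pre_combine_matrices C11 C12 C21 C22) := by unfold Pre_combine_matrices; infer_instance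

def pvWitness_combine_matrices : List (List Int) × List (List Int) × List (List Int) × List (List Int) :=
  ([[1, 2], [3, 4]], [[5, 6], [7, 8]], [[9, 10], [11, 12]], [[13, 14], [15, 16]])

def Spec_combine_matrices (C11 : List (List Int)) (C12 : List (List Int)) (C21 : List (List Int)) (C22 : List (List Int)) (out : List (List Int)) : Prop := out = combine_matrices_alt C11 C12 C21 C22
instance (C11 : List (List Int)) (C12 : List (List Int)) (C21 : List (List Int)) (C22 : List (List Int)) (out : List (List Int)) : Decidable (Spec_combine_matrices C11 C12 C21 C22 out) := by unfold Spec_combine_matrices; infer_instance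

-- ===== CLAIM (what is proved, stated in full; the proofs are below) =====
def Claim_equal_combine_matrices : Prop := ∀ (C11 : List (List Int)) (C12 : List (List Int)) (C21 : List (List Int)) (C22 : List (List Int)), Dom_combine_matrices C11 C12 C21 C22 → Pre_combine_matrices C11 C12 C21 C22 → Spec_combine_matrices C11 C12 C21 C22 (combine_matrices C11 C12 C21 C22)

-- ===== LEMMAS AND PROOFS =====

theorem pv_getD_set_self {α : Type} (l : List α) (i : Nat) (x d : α) (h : i < l.length) :
    (l.set i x).getD i d = x := by
  simp [List.getD, h]

theorem pv_getD_set_ne {α : Type} (l : List α) (i j : Nat) (x d : α) (h : i ≠ j) :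
    (l.set i x).getD j d = l.getD j d := by
  simp [List.getD, h]

theorem pv_set_getD_self {α : Type} (l : List α) (n : Nat) (d : α) (_h : n < l.length) :
    l.set n (l.getD n d) = l := by
  apply List.ext_getElem (by simp)
  intro i h1 h2
  rw [List.getElem_set]
  split
  · next he => subst he; rw [List.getD_eq_getElem _ _ h2]
  · rfl

-- per-row step: one inner-loop iteration of A restricted to a single row
def pvRowStep (m : Nat) (a b : Nat → Int) (r : List Int) (j : Nat) : List Int :=
  (r.set j (a j)).set (j + m) (b j)

theorem pvRowFold_length (m k : Nat) (a b : Nat → Int) (r : List Int) :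
    ((List.range k).foldl (pvRowStep m a b) r).length = r.length := by
  induction k with
  | zero => simp
  | succ k ih => simp [List.range_succ, pvRowStep, ih]

theorem pvRowFold_getD (m : Nat) (a b : Nat → Int) :
    ∀ (k : Nat) (r : List Int) (p : Nat), k ≤ m → m + k ≤ r.length →
    ((List.range k).foldl (pvRowStep m a b) r).getD p 0 =
      if p < k then a p else if m ≤ p ∧ p < m + k then b (p - m) else r.getD p 0 := by
  intro k
  induction k with
  | zero =>
    intro r p _ _
    simp only [List.range_zero, List.foldl_nil]
    split_ifs with h1 h2
    · exact absurd h1 (by omega)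
    · exact absurd h2 (by omega)
    · rfl
  | succ k ih =>
    intro r p hk hr
    rw [List.range_succ, List.foldl_append]
    simp only [List.foldl_cons, List.foldl_nil]
    set X := (List.range k).foldl (pvRowStep m a b) r with hX
    have hlen : X.length = r.length := pvRowFold_length m k a b r
    have hstep : pvRowStep m a b X k = (X.set k (a k)).set (k + m) (b k) := rfl
    rw [hstep]
    by_cases hp1 : p = k + m
    · subst hp1
      rw [pv_getD_set_self _ _ _ _ (by rw [List.length_set, hlen]; omega)]
      rw [if_neg (by omega), if_pos (by omega)]
      congr 1
      omega
    · rw [pv_getD_set_ne _ _ _ _ _ (by omega)]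
      by_cases hp2 : p = k
      · subst hp2
        rw [pv_getD_set_self _ _ _ _ (by rw [hlen]; omega)]
        rw [if_pos (by omega)]
      · rw [pv_getD_set_ne _ _ _ _ _ (by omega)]
        rw [hX, ih r p (by omega) (by omega)]
        by_cases h1 : p < k
        · rw [if_pos h1, if_pos (by omega)]
        · rw [if_neg h1, if_neg (show ¬ p < k + 1 by omega)]
          by_cases h2 : m ≤ p ∧ p < m + k
          · rw [if_pos h2, if_pos (by omega)]
          · rw [if_neg h2, if_neg (by rw [not_and_or] at h2 ⊢; omega)]

theorem pvSetCell_top (C : List (List Int)) (r1 r2 : List Int) (i m q : Nat) (v : Int)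
    (hi : i < C.length) (hm : 0 < m) :
    pvSetCell ((C.set i r1).set (i + m) r2) i q v = (C.set i (r1.set q v)).set (i + m) r2 := by
  unfold pvSetCell
  rw [pv_getD_set_ne _ _ _ _ _ (by omega), pv_getD_set_self _ _ _ _ hi]
  rw [List.set_comm _ _ (show i + m ≠ i by omega), List.set_set]

theorem pvSetCell_bot (C : List (List Int)) (r1 r2 : List Int) (i m q : Nat) (v : Int)
    (hC : i + m < C.length) :
    pvSetCell ((C.set i r1).set (i + m) r2) (i + m) q v = (C.set i r1).set (i + m) (r2.set q v) := by
  unfold pvSetCell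
  rw [pv_getD_set_self _ _ _ _ (by simp [hC]), List.set_set]

-- the inner loop of A over j, decomposed into two independent row folds
theorem pvInner_decomp (m i : Nat) (a b c d : Nat → Int) (hm : 0 < m) :
    ∀ (k : Nat) (C : List (List Int)), i + m < C.length →
    (List.range k).foldl (fun C j =>
        pvSetCell (pvSetCell (pvSetCell (pvSetCell C i j (a j)) i (j + m) (b j)) (i + m) j (c j)) (i + m) (j + m) (d j)) C
    = (C.set i ((List.range k).foldl (pvRowStep m a b) (C.getD i []))).set (i + m)
        ((List.range k).foldl (pvRowStep m c d) (C.getD (i + m) [])) := by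
  intro k
  induction k with
  | zero =>
    intro C hC
    simp only [List.range_zero, List.foldl_nil]
    rw [pv_set_getD_self _ _ _ (by omega)]
    rw [pv_set_getD_self _ _ _ hC]
  | succ k ih =>
    intro C hC
    rw [List.range_succ, List.foldl_append]
    simp only [List.foldl_cons, List.foldl_nil]
    rw [ih C hC]
    have hi : i < C.length := by omega
    set R1 := (List.range k).foldl (pvRowStep m a b) (C.getD i []) with hR1
    set R2 := (List.range k).foldl (pvRowStep m c d) (C.getD (i + m) []) with hR2
    rw [pvSetCell_top C R1 R2 i m k _ hi hm,
        pvSetCell_top C (R1.set k (a k)) R2 i m (k + m) _ hi hm,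
        pvSetCell_bot C _ R2 i m k _ hC,
        pvSetCell_bot C _ (R2.set k (c k)) i m (k + m) _ hC]
    simp only [List.foldl_append, List.foldl_cons, List.foldl_nil, pvRowStep, ← hR1, ← hR2]

theorem pv_ext_getD {α : Type} (d : α) (l1 l2 : List α) (h : l1.length = l2.length)
    (h2 : ∀ i, l1.getD i d = l2.getD i d) : l1 = l2 := by
  apply List.ext_getElem h
  intro i h1 h2'
  have := h2 i
  rwa [List.getD_eq_getElem _ _ h1, List.getD_eq_getElem _ _ h2'] at this

-- the final contents of a written row: positions j get a j, positions j+m get b j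
def pvTop (A B : List (List Int)) (m i : Nat) : List Int :=
  (List.range m).foldl
    (pvRowStep m (fun j => (A.getD i []).getD j 0) (fun j => (B.getD i []).getD j 0))
    (List.replicate (2 * m) 0)

theorem pvOuter (C11 C12 C21 C22 : List (List Int)) (m : Nat) (hmpos : 0 < m) :
    ∀ t, t ≤ m →
    (((List.range t).foldl (fun C i => (List.range m).foldl (fun C j =>
        pvSetCell (pvSetCell (pvSetCell (pvSetCell C i j ((C11.getD i []).getD j 0)) i (j + m) ((C12.getD i []).getD j 0)) (i + m) j ((C21.getD i []).getD j 0)) (i + m) (j + m) ((C22.getD i []).getD j 0)) C)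
        (List.replicate (2 * m) (List.replicate (2 * m) (0 : Int)))).length = 2 * m)
    ∧ ∀ p, ((List.range t).foldl (fun C i => (List.range m).foldl (fun C j =>
        pvSetCell (pvSetCell (pvSetCell (pvSetCell C i j ((C11.getD i []).getD j 0)) i (j + m) ((C12.getD i []).getD j 0)) (i + m) j ((C21.getD i []).getD j 0)) (i + m) (j + m) ((C22.getD i []).getD j 0)) C)
        (List.replicate (2 * m) (List.replicate (2 * m) (0 : Int)))).getD p []
      = if p < t then pvTop C11 C12 m p
        else if m ≤ p ∧ p < m + t then pvTop C21 C22 m (p - m)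
        else (List.replicate (2 * m) (List.replicate (2 * m) (0 : Int))).getD p [] := by
  intro t
  induction t with
  | zero =>
    intro _
    constructor
    · simp
    · intro p
      simp only [List.range_zero, List.foldl_nil]
      split_ifs with h1 h2
      · exact absurd h1 (by omega)
      · exact absurd h2 (by omega)
      · rfl
  | succ t ih =>
    intro ht
    obtain ⟨ihlen, ihget⟩ := ih (by omega)
    rw [List.range_succ, List.foldl_append]
    simp only [List.foldl_cons, List.foldl_nil]
    set M := (List.range t).foldl _ _ with hM
    rw [pvInner_decomp m t _ _ _ _ hmpos m M (by rw [ihlen]; omega)]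
    have hzrow : M.getD t [] = List.replicate (2 * m) (0 : Int) := by
      rw [ihget t, if_neg (by omega), if_neg (by omega)]
      simp [List.getD, show t < 2 * m by omega]
    have hzrow2 : M.getD (t + m) [] = List.replicate (2 * m) (0 : Int) := by
      rw [ihget (t + m), if_neg (by omega), if_neg (by omega)]
      simp [List.getD, show t + m < 2 * m by omega]
    rw [hzrow, hzrow2]
    refine ⟨by simp [ihlen], ?_⟩
    intro p
    by_cases hp1 : p = t + m
    · subst hp1
      rw [pv_getD_set_self _ _ _ _ (by simp [ihlen]; omega)]
      rw [if_neg (by omega), if_pos (by omega)]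
      rw [show t + m - m = t from by omega]
      rfl
    · rw [pv_getD_set_ne _ _ _ _ _ (by omega)]
      by_cases hp2 : p = t
      · subst hp2
        rw [pv_getD_set_self _ _ _ _ (by rw [ihlen]; omega)]
        rw [if_pos (by omega)]
        rfl
      · rw [pv_getD_set_ne _ _ _ _ _ (by omega)]
        rw [ihget p]
        by_cases h1 : p < t
        · rw [if_pos h1, if_pos (by omega)]
        · rw [if_neg h1, if_neg (show ¬ p < t + 1 by omega)]
          by_cases h2 : m ≤ p ∧ p < m + t
          · rw [if_pos h2, if_pos (by omega)]
          · rw [if_neg h2, if_neg (by rw [not_and_or] at h2 ⊢; omega)]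

theorem pv_takeApp_getD (x y : List Int) (m p : Nat) (hx : m ≤ x.length) (hy : m ≤ y.length) :
    (x.take m ++ y.take m).getD p 0 =
      if p < m then x.getD p 0 else if p < m + m then y.getD (p - m) 0 else 0 := by
  have hlx : (x.take m).length = m := by simp [hx]
  have hly : (y.take m).length = m := by simp [hy]
  by_cases h1 : p < m
  · rw [if_pos h1]
    rw [List.getD_eq_getElem _ _ (by simp [hlx, hly]; omega)]
    rw [List.getElem_append_left (by omega)]
    rw [List.getElem_take]
    rw [List.getD_eq_getElem _ _ (by omega)]
  · rw [if_neg h1]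
    by_cases h2 : p < m + m
    · rw [if_pos h2]
      rw [List.getD_eq_getElem _ _ (by simp [hlx, hly]; omega)]
      rw [List.getElem_append_right (by omega)]
      simp only [hlx]
      rw [List.getElem_take]
      rw [List.getD_eq_getElem _ _ (by omega)]
    · rw [if_neg h2]
      rw [List.getD_eq_default _ _ (by simp [hlx, hly]; omega)]

theorem pvAlt_length (C11 C12 C21 C22 : List (List Int)) :
    (combine_matrices_alt C11 C12 C21 C22).length = C11.length + C11.length := by
  simp [combine_matrices_alt]

theorem pvAlt_getD (C11 C12 C21 C22 : List (List Int)) (p : Nat) :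
    (combine_matrices_alt C11 C12 C21 C22).getD p [] =
      if p < C11.length then (C11.getD p []).take C11.length ++ (C12.getD p []).take C11.length
      else if p < C11.length + C11.length then (C21.getD (p - C11.length) []).take C11.length ++ (C22.getD (p - C11.length) []).take C11.length
      else [] := by
  simp only [combine_matrices_alt]
  by_cases h1 : p < C11.length
  · rw [List.getD_eq_getElem _ _ (by simp; omega)]
    rw [List.getElem_append_left (by simp; omega)]
    simp [h1]
  · rw [if_neg h1]
    by_cases h2 : p < C11.length + C11.length
    · rw [List.getD_eq_getElem _ _ (by simp; omega)]
      rw [List.getElem_append_right (by simp; omega)]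
      rw [if_pos h2]
      simp
    · rw [if_neg h2]
      rw [List.getD_eq_default _ _ (by simp; omega)]

theorem combine_matrices_spec : Claim_equal_combine_matrices := by
  unfold Claim_equal_combine_matrices
  intro C11 C12 C21 C22 _ hpre
  unfold Spec_combine_matrices
  obtain ⟨h12, h21, h22, hrows⟩ := hpre
  by_cases hm0 : C11.length = 0
  · simp [combine_matrices, combine_matrices_alt, hm0]
  have hmpos : 0 < C11.length := by omega
  set m := C11.length with hm
  have hmid : C11.length * 2 / 2 = m := by omega
  have hn : C11.length * 2 = 2 * m := by omega
  show combine_matrices C11 C12 C21 C22 = _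
  rw [combine_matrices]
  simp only [hn, show 2 * m / 2 = m from by omega]
  obtain ⟨hlen, hget⟩ := pvOuter C11 C12 C21 C22 m hmpos m (le_refl m)
  apply pv_ext_getD []
  · rw [hlen, pvAlt_length]; omega
  · intro p
    rw [hget p, pvAlt_getD]
    by_cases h1 : p < m
    · rw [if_pos h1, if_pos h1]
      obtain ⟨hc11, hc12, _, _⟩ := hrows p h1
      apply pv_ext_getD 0
      · rw [pvTop, pvRowFold_length, List.length_replicate, List.length_append,
          List.length_take, List.length_take]
        omega
      · intro q
        rw [pvTop, pvRowFold_getD m _ _ m _ q (le_refl m) (by rw [List.length_replicate]; omega)]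
        rw [pv_takeApp_getD _ _ m q hc11 hc12]
        split_ifs with g1 g2 g3 <;> try rfl
        · exact absurd g3 (by omega)
        · exact absurd g2 (by omega)
        · simp [List.getD, show ¬ q < 2 * m by omega]
    · have h1' : ¬ p < C11.length := by omega
      rw [if_neg h1, if_neg h1']
      by_cases h2 : p < m + m
      · rw [if_pos (show m ≤ p ∧ p < m + m by omega),
            if_pos (show p < C11.length + C11.length by omega)]
        rw [← hm]
        obtain ⟨_, _, hc21, hc22⟩ := hrows (p - m) (by omega)
        apply pv_ext_getD 0
        · rw [pvTop, pvRowFold_length, List.length_replicate, List.length_append,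
            List.length_take, List.length_take]
          omega
        · intro q
          rw [pvTop, pvRowFold_getD m _ _ m _ q (le_refl m) (by rw [List.length_replicate]; omega)]
          rw [pv_takeApp_getD _ _ m q hc21 hc22]
          split_ifs with g1 g2 g3 <;> try rfl
          · exact absurd g3 (by omega)
          · exact absurd g2 (by omega)
          · simp [List.getD, show ¬ q < 2 * m by omega]
      · rw [if_neg (show ¬ (m ≤ p ∧ p < m + m) by rw [not_and_or]; omega),
            if_neg (show ¬ p < C11.length + C11.length by omega)]
        simp [List.getD, show ¬ p < 2 * m by omega]
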